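-- pv_equiv track=rewrite | github.com/ttasjwi/algorithm | 문제풀이/온라인 저지/프로그래머스/# 02. Level 2/# 049994. 방문 길이/python/solution.py | solution
-- ===== SOURCE A (Python) =====
-- def solution(dirs):
--     d = {'R': (1, 0, 0), 'D': (0, -1, 1), 'L': (-1, 0, 2), 'U': (0, 1, 3)}
--     answer = 0
--     x, y = 0, 0
--     s = set()
--     for dir in dirs:
--         nx, ny, d_id = x + d[dir][0], y + d[dir][1], d[dir][2]
--         if -5 <= nx <= 5 and -5 <= ny <= 5:
--             if (x, y, d_id) not in s:
--                 answer += 1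
--                 s.add((x, y, d_id))
--                 s.add((nx, ny, (d_id + 2) % 4))
--             x, y = nx, ny
--     return answer
-- ===== SOURCE B (Python) =====
-- def solution(dirs):
--     moves = {'R': (1, 0), 'D': (0, -1), 'L': (-1, 0), 'U': (0, 1)}
--     cur = (0, 0)
--     path = [cur]
--     for c in dirs:
--         dx, dy = moves[c]
--         nxt = (cur[0] + dx, cur[1] + dy)
--         if -5 <= nxt[0] <= 5 and -5 <= nxt[1] <= 5:
--             path.append(nxt)
--             cur = nxt
--     edges = set()
--     for p, q in zip(path, path[1:]):
--         edges.add((min(p, q), max(p, q)))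
--     return len(edges)
-- ===== Notes on version B (the rewrite author's own statement) =====
-- stated objective: alternative
-- what changed: B first builds the list of visited positions, then a second pass canonicalizes each consecutive pair as one undirected (min,max) edge in a set and returns its size, instead of A's single loop that counts while storing two directed half-edges keyed by a direction id.
import Mathlib
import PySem

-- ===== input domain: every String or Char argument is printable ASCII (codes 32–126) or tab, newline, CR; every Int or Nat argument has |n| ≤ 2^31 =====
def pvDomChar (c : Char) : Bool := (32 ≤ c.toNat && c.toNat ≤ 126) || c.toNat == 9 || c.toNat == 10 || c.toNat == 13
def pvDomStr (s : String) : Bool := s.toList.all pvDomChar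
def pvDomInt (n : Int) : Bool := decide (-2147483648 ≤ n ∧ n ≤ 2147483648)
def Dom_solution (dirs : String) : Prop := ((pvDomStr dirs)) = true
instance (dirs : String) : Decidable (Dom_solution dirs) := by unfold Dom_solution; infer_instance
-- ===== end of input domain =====

-- B rebuilds the answer in two passes (visited-position list, then a set of undirected (min,max) edges)
-- instead of A's single counting loop over directed half-edges; equivalent on Pre_, not claimed faster.

-- ===== PORT A =====
def pvDictA : PySem.Dict Char (Int × Int × Int) :=
  ((((PySem.Dict.empty).insert 'R' (1, 0, 0)).insert 'D' (0, -1, 1)).insert 'L' (-1, 0, 2)).insert 'U' (0, 1, 3)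

-- one step of A's loop; on a char outside the dict Python raises KeyError (excluded by Pre_solution), the port keeps the state
def pvStepA (st : Int × Int × Int × PySem.Set (Int × Int × Int)) (c : Char) :
    Int × Int × Int × PySem.Set (Int × Int × Int) :=
  match pvDictA.get? c with
  | none => st
  | some (dx, dy, did) =>
    let nx := st.2.1 + dx
    let ny := st.2.2.1 + dy
    if -5 ≤ nx ∧ nx ≤ 5 ∧ -5 ≤ ny ∧ ny ≤ 5 then
      if PySem.Set.contains st.2.2.2 (st.2.1, st.2.2.1, did) then
        (st.1, nx, ny, st.2.2.2)
      else
        (st.1 + 1, nx, ny,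
          PySem.Set.add (PySem.Set.add st.2.2.2 (st.2.1, st.2.2.1, did))
            (nx, ny, PySem.Int.mod (did + 2) 4))
    else st

def solution (dirs : String) : Int :=
  (dirs.toList.foldl pvStepA (0, 0, 0, PySem.Set.empty)).1

-- ===== PORT B =====
def pvDictB : PySem.Dict Char (Int × Int) :=
  ((((PySem.Dict.empty).insert 'R' (1, 0)).insert 'D' (0, -1)).insert 'L' (-1, 0)).insert 'U' (0, 1)

-- one step of B's path-building loop; KeyError chars (excluded by Pre_solution) keep the state
def pvStepB (st : (Int × Int) × List (Int × Int)) (c : Char) : (Int × Int) × List (Int × Int) :=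
  match pvDictB.get? c with
  | none => st
  | some (dx, dy) =>
    let nxt := (st.1.1 + dx, st.1.2 + dy)
    if -5 ≤ nxt.1 ∧ nxt.1 ≤ 5 ∧ -5 ≤ nxt.2 ∧ nxt.2 ≤ 5 then
      (nxt, st.2 ++ [nxt])
    else st

-- (min(p,q), max(p,q)) on pairs: Python tuple comparison is lexicographic
def pvCanon (p q : Int × Int) : (Int × Int) × (Int × Int) :=
  if q.1 < p.1 ∨ (q.1 = p.1 ∧ q.2 < p.2) then (q, p) else (p, q)

def pvEdges (path : List (Int × Int)) : PySem.Set ((Int × Int) × (Int × Int)) :=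
  (path.zip path.tail).foldl (fun s pq => PySem.Set.add s (pvCanon pq.1 pq.2)) PySem.Set.empty

def solution_alt (dirs : String) : Int :=
  PySem.Set.len (pvEdges (dirs.toList.foldl pvStepB ((0, 0), [(0, 0)])).2)

-- ===== PRECONDITION & SPEC =====
-- Pre_ excludes exactly the strings containing a char that is not one of the four direction keys, on which Python A (and B) raises KeyError.
def Pre_solution (dirs : String) : Prop :=
  (dirs.toList.all fun c => c == 'R' || c == 'D' || c == 'L' || c == 'U') = true
instance (dirs : String) : Decidable (Pre_solution dirs) := by unfold Pre_solution; infer_instance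

def pvWitness_solution : String := "RD"

def Spec_solution (dirs : String) (out : Int) : Prop := out = solution_alt dirs
instance (dirs : String) (out : Int) : Decidable (Spec_solution dirs out) := by unfold Spec_solution; infer_instance

-- ===== CLAIM (what is proved, stated in full; the proofs are below) =====
def Claim_equal_solution : Prop := ∀ (dirs : String), Dom_solution dirs → Pre_solution dirs → Spec_solution dirs (solution dirs)

-- ===== LEMMAS AND PROOFS =====

-- direction vectors / reversal, used only by the proofs
def pvDelta (d : Int) : Int × Int :=
  if d = 0 then (1, 0) else if d = 1 then (0, -1) else if d = 2 then (-1, 0) else (0, 1)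

def pvEdge (p : Int × Int) (d : Int) : (Int × Int) × (Int × Int) :=
  pvCanon p (p.1 + (pvDelta d).1, p.2 + (pvDelta d).2)

def pvValid (d : Int) : Prop := d = 0 ∨ d = 1 ∨ d = 2 ∨ d = 3

lemma pvEdge_R (p : Int × Int) : pvEdge p 0 = (p, (p.1 + 1, p.2)) := by
  simp [pvEdge, pvDelta, pvCanon]

lemma pvEdge_D (p : Int × Int) : pvEdge p 1 = ((p.1, p.2 - 1), p) := by
  simp [pvEdge, pvDelta, pvCanon]; omega

lemma pvEdge_L (p : Int × Int) : pvEdge p 2 = ((p.1 - 1, p.2), p) := by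
  simp [pvEdge, pvDelta, pvCanon]; omega

lemma pvEdge_U (p : Int × Int) : pvEdge p 3 = (p, (p.1, p.2 + 1)) := by
  simp [pvEdge, pvDelta, pvCanon]

-- an undirected edge has exactly two directed representations
lemma pvEdge_inj (p q : Int × Int) (d e : Int) (hd : pvValid d) (he : pvValid e) :
    pvEdge p d = pvEdge q e ↔
      ((p = q ∧ d = e) ∨ (p = (q.1 + (pvDelta e).1, q.2 + (pvDelta e).2) ∧ d = PySem.Int.mod (e + 2) 4)) := by
  obtain ⟨p1, p2⟩ := p; obtain ⟨q1, q2⟩ := q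
  rcases hd with rfl | rfl | rfl | rfl <;> rcases he with rfl | rfl | rfl | rfl <;>
    simp only [pvEdge_R, pvEdge_D, pvEdge_L, pvEdge_U, pvDelta,
      show PySem.Int.mod (0 + 2 : Int) 4 = 2 from by decide,
      show PySem.Int.mod (1 + 2 : Int) 4 = 3 from by decide,
      show PySem.Int.mod (2 + 2 : Int) 4 = 0 from by decide,
      show PySem.Int.mod (3 + 2 : Int) 4 = 1 from by decide,
      Prod.mk.injEq] <;>
    norm_num <;> omega

-- invariant tying A's loop state to B's path
def pvInv (x y ans : Int) (s : PySem.Set (Int × Int × Int)) (path : List (Int × Int)) : Prop :=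
  path ≠ [] ∧ path.getLast? = some (x, y) ∧ ans = PySem.Set.len (pvEdges path) ∧
    ∀ p d, pvValid d → ((p.1, p.2, d) ∈ s ↔ pvEdge p d ∈ pvEdges path)

lemma pvLen_add {α : Type} [BEq α] [LawfulBEq α] (s : PySem.Set α) (x : α) :
    PySem.Set.len (PySem.Set.add s x) = if x ∈ s then PySem.Set.len s else PySem.Set.len s + 1 := by
  simp only [PySem.Set.len, PySem.Set.add, PySem.Set.contains]
  by_cases h : x ∈ s <;> simp [h]

lemma pvZip_append (path : List (Int × Int)) (l n : Int × Int) (h : path.getLast? = some l) :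
    (path ++ [n]).zip (path ++ [n]).tail = path.zip path.tail ++ [(l, n)] := by
  induction path with
  | nil => simp at h
  | cons a t ih =>
    cases t with
    | nil => simp_all
    | cons b t' =>
      simp only [List.getLast?_cons_cons] at h
      have hih := ih h
      simp only [List.cons_append, List.tail_cons] at hih
      simp only [List.cons_append, List.tail_cons, List.zip_cons_cons, hih]

lemma pvEdges_append (path : List (Int × Int)) (l n : Int × Int) (h : path.getLast? = some l) :
    pvEdges (path ++ [n]) = PySem.Set.add (pvEdges path) (pvCanon l n) := by
  simp only [pvEdges, pvZip_append path l n h, List.foldl_append, List.foldl_cons, List.foldl_nil]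

-- the two dictionaries, case-analysed on the char
lemma pvDict_cases (c : Char) :
    (pvDictA.get? c = none ∧ pvDictB.get? c = none) ∨
    (∃ dx dy did, pvDictA.get? c = some (dx, dy, did) ∧ pvDictB.get? c = some (dx, dy) ∧
      pvValid did ∧ pvDelta did = (dx, dy)) := by
  by_cases hR : c = 'R'
  · subst hR; right; exact ⟨1, 0, 0, by decide, by decide, Or.inl rfl, rfl⟩
  by_cases hD : c = 'D'
  · subst hD; right; exact ⟨0, -1, 1, by decide, by decide, Or.inr (Or.inl rfl), rfl⟩
  by_cases hL : c = 'L'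
  · subst hL; right; exact ⟨-1, 0, 2, by decide, by decide, Or.inr (Or.inr (Or.inl rfl)), rfl⟩
  by_cases hU : c = 'U'
  · subst hU; right; exact ⟨0, 1, 3, by decide, by decide, Or.inr (Or.inr (Or.inr rfl)), rfl⟩
  · left
    have r : ('R' == c) = false := beq_false_of_ne fun h => hR h.symm
    have d : ('D' == c) = false := beq_false_of_ne fun h => hD h.symm
    have l : ('L' == c) = false := beq_false_of_ne fun h => hL h.symm
    have u : ('U' == c) = false := beq_false_of_ne fun h => hU h.symm
    constructor <;>
      simp [pvDictA, pvDictB, PySem.Dict.get?, PySem.Dict.insert, PySem.Dict.empty,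
        PySem.Dict.contains, List.find?, r, d, l, u]

lemma pvMain (cs : List Char) : ∀ (x y ans : Int) (s : PySem.Set (Int × Int × Int))
    (path : List (Int × Int)), pvInv x y ans s path →
    (cs.foldl pvStepA (ans, x, y, s)).1 =
      PySem.Set.len (pvEdges (cs.foldl pvStepB ((x, y), path)).2) := by
  induction cs with
  | nil => intro x y ans s path hInv; exact hInv.2.2.1
  | cons c rest ih =>
    intro x y ans s path hInv
    obtain ⟨hne, hlast, hans, hmem⟩ := hInv
    simp only [List.foldl_cons]
    rcases pvDict_cases c with ⟨hA, hB⟩ | ⟨dx, dy, did, hA, hB, hval, hdel⟩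
    · rw [show pvStepA (ans, x, y, s) c = (ans, x, y, s) by simp [pvStepA, hA],
          show pvStepB ((x, y), path) c = ((x, y), path) by simp [pvStepB, hB]]
      exact ih x y ans s path ⟨hne, hlast, hans, hmem⟩
    · by_cases hbnd : -5 ≤ x + dx ∧ x + dx ≤ 5 ∧ -5 ≤ y + dy ∧ y + dy ≤ 5
      · -- accepted move
        have hBstep : pvStepB ((x, y), path) c = ((x + dx, y + dy), path ++ [(x + dx, y + dy)]) := by
          simp [pvStepB, hB, hbnd]
        have hEapp := pvEdges_append path (x, y) (x + dx, y + dy) hlast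
        have hEdge : pvEdge (x, y) did = pvCanon (x, y) (x + dx, y + dy) := by
          simp [pvEdge, hdel]
        have hlast' : (path ++ [(x + dx, y + dy)]).getLast? = some (x + dx, y + dy) := by simp
        have hne' : path ++ [(x + dx, y + dy)] ≠ [] := by simp
        by_cases hin : ((x, y, did) : Int × Int × Int) ∈ s
        · -- edge already counted
          rw [show pvStepA (ans, x, y, s) c = (ans, x + dx, y + dy, s) by
            simp [pvStepA, hA, hbnd, hin], hBstep]
          apply ih
          refine ⟨hne', hlast', ?_, ?_⟩
          · rw [hEapp, pvLen_add, if_pos, hans]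
            rw [← hEdge]; exact (hmem (x, y) did hval).mp hin
          · intro p d hd
            rw [hmem p d hd, hEapp, PySem.Set.mem_add]
            constructor
            · exact Or.inl
            · rintro (h | h)
              · exact h
              · rw [h, ← hEdge]; exact (hmem (x, y) did hval).mp hin
        · -- new edge
          rw [show pvStepA (ans, x, y, s) c =
              (ans + 1, x + dx, y + dy,
                PySem.Set.add (PySem.Set.add s (x, y, did))
                  (x + dx, y + dy, PySem.Int.mod (did + 2) 4)) by
            simp [pvStepA, hA, hbnd, hin], hBstep]
          apply ih
          refine ⟨hne', hlast', ?_, ?_⟩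
          · rw [hEapp, pvLen_add, if_neg, hans]
            rw [← hEdge]; rw [← hmem (x, y) did hval]; exact hin
          · intro p d hd
            rw [hEapp, PySem.Set.mem_add, PySem.Set.mem_add, PySem.Set.mem_add, hmem p d hd, ← hEdge]
            rw [pvEdge_inj p (x, y) d did hd hval]
            constructor
            · rintro ((h | h) | h)
              · exact Or.inl h
              · right
                simp only [Prod.mk.injEq] at h
                exact Or.inl ⟨Prod.ext h.1 h.2.1, h.2.2⟩
              · right
                simp only [Prod.mk.injEq] at h
                right
                refine ⟨?_, h.2.2⟩
                rw [hdel]; exact Prod.ext h.1 h.2.1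
            · rintro (h | (⟨rfl, rfl⟩ | ⟨hp, rfl⟩))
              · exact Or.inl (Or.inl h)
              · exact Or.inl (Or.inr rfl)
              · right
                rw [hdel] at hp
                simp [hp]
      · -- rejected move: both states unchanged
        rw [show pvStepA (ans, x, y, s) c = (ans, x, y, s) by simp [pvStepA, hA, hbnd],
            show pvStepB ((x, y), path) c = ((x, y), path) by simp [pvStepB, hB, hbnd]]
        exact ih x y ans s path ⟨hne, hlast, hans, hmem⟩

-- ===== VERDICT (by name: the statement is the Claim_ definition above) =====
theorem solution_spec : Claim_equal_solution := by
  intro dirs _ _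
  unfold Spec_solution solution solution_alt
  exact pvMain dirs.toList 0 0 0 PySem.Set.empty [(0, 0)]
    ⟨by simp, by simp, by simp [pvEdges], by intro p d _; simp [pvEdges, PySem.Set.empty]⟩
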